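-- pv_equiv track=rewrite | github.com/EthanXC/PokerBot | pokerbot/games/leduc.py | _contributions
-- ===== SOURCE A (Python) =====
-- BET_SIZE = {1: 2, 2: 4}
--
-- ANTE = 1
--
-- def _contributions(history: str) -> list[int]:
--     """Total chips each player has put in (incl. antes), given history.
--
--     Walks the history maintaining per-round running totals so that
--     'call' and 'raise' know how much to match.
--     """
--     contrib = [ANTE, ANTE]
--     round_idx = 1
--     actor = 0
--     # Per-round contributions above the ante baseline.
--     round_in = [0, 0]
--     for ch in history:
--         if ch == "/":
--             round_idx = 2
--             actor = 0
--             round_in = [0, 0]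
--             continue
--         if ch == "k":
--             pass
--         elif ch == "b":
--             amount = BET_SIZE[round_idx]
--             contrib[actor] += amount
--             round_in[actor] += amount
--         elif ch == "r":
--             # Call to match opp's round_in, then raise by bet_size.
--             opp = 1 - actor
--             to_call = round_in[opp] - round_in[actor]
--             add = to_call + BET_SIZE[round_idx]
--             contrib[actor] += add
--             round_in[actor] += add
--         elif ch == "c":
--             opp = 1 - actor
--             to_call = round_in[opp] - round_in[actor]
--             contrib[actor] += to_call
--             round_in[actor] += to_call
--         elif ch == "f":
--             pass
--         actor = 1 - actor
--     return contrib
-- ===== SOURCE B (Python) =====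
-- ANTE = 1
--
--
-- def _round_levels(seg, bet):
--     """Final per-player chip levels of one betting round.
--
--     Swap-based pair automaton: `me` is always the player about to act;
--     'r' and 'c' SET the level to match/overtake the opponent directly.
--     The chips a player puts in during a round equal that player's final
--     level, because every action changes contribution and level by the
--     same amount and levels start at 0.
--     """
--     me, opp = 0, 0
--     for ch in seg:
--         if ch == "b":
--             me += bet
--         elif ch == "r":
--             me = opp + bet
--         elif ch == "c":
--             me = opp
--         me, opp = opp, me
--     # Map (me, opp) back to (player0, player1) by how many swaps happened.
--     return (me, opp) if len(seg) % 2 == 0 else (opp, me)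
--
--
-- def _contributions(history: str) -> list[int]:
--     """Total chips each player has put in (incl. antes), given history."""
--     first, *rest = history.split("/")
--     t0, t1 = _round_levels(first, 2)
--     t0 += ANTE
--     t1 += ANTE
--     for seg in rest:
--         a, b = _round_levels(seg, 4)
--         t0 += a
--         t1 += b
--     return [t0, t1]
-- ===== Notes on version B (the rewrite author's own statement) =====
-- stated objective: alternative
-- what changed: A accumulates both players' contributions in one pass with an actor index, round flag and to_call delta arithmetic; B tracks no contributions at all: it uses the invariant that the chips a player adds in a round equal that player's final round level, computing per-round final levels with a swap-based actor-free pair automaton ('r'/'c' set the level directly) and summing the levels plus antes.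
import Mathlib
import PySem

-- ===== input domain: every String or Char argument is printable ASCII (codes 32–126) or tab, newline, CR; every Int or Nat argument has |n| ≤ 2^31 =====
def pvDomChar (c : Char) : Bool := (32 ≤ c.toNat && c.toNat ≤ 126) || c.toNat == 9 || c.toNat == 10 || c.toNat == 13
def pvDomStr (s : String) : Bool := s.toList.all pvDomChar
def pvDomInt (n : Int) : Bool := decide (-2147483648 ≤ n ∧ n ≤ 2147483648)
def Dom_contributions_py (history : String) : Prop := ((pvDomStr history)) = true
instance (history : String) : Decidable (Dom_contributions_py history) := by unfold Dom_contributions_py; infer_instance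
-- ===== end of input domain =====

-- B tracks no contributions during the scan: per round it computes only the two final round
-- levels with a swap-based actor-free pair automaton and sums them plus the antes (objective:
-- alternative). Neither version mutates its argument; equivalence is about the return value.

-- ===== PORT A =====
-- BET_SIZE = {1: 2, 2: 4}; round_idx only ever holds 1 or 2, so the lookup never raises;
-- ported as a direct two-case function (exact on the values that occur).
def betSize (roundIdx : Int) : Int := if roundIdx = 1 then 2 else 4

-- contrib and round_in are fixed two-element lists indexed by actor ∈ {0,1}: ported as pairs,
-- `contrib[actor]` becomes an `if actor = 0` selection (exact, actor is always 0 or 1).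
-- State: (contrib0, contrib1, round_idx, actor, round_in0, round_in1).
def aStep (s : Int × Int × Int × Int × Int × Int) (ch : Char) :
    Int × Int × Int × Int × Int × Int :=
  let (c0, c1, rd, a, r0, r1) := s
  if ch = '/' then (c0, c1, 2, 0, 0, 0)
  else
    let (c0, c1, r0, r1) :=
      if ch = 'k' then (c0, c1, r0, r1)
      else if ch = 'b' then
        let amount := betSize rd
        if a = 0 then (c0 + amount, c1, r0 + amount, r1) else (c0, c1 + amount, r0, r1 + amount)
      else if ch = 'r' then
        let toCall := if a = 0 then r1 - r0 else r0 - r1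
        let add := toCall + betSize rd
        if a = 0 then (c0 + add, c1, r0 + add, r1) else (c0, c1 + add, r0, r1 + add)
      else if ch = 'c' then
        let toCall := if a = 0 then r1 - r0 else r0 - r1
        if a = 0 then (c0 + toCall, c1, r0 + toCall, r1) else (c0, c1 + toCall, r0, r1 + toCall)
      else (c0, c1, r0, r1)
    (c0, c1, rd, 1 - a, r0, r1)

def contributions_py (history : String) : List Int :=
  let s := history.toList.foldl aStep (1, 1, 1, 0, 0, 0)
  [s.1, s.2.1]

-- ===== PORT B =====
-- _round_levels' inner step: `me` is the player about to act; 'r'/'c' SET the level directly,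
-- and the pair is swapped after every char.
def lstep (bet : Int) (s : Int × Int) (ch : Char) : Int × Int :=
  let (me, opp) := s
  let me :=
    if ch = 'b' then me + bet
    else if ch = 'r' then opp + bet
    else if ch = 'c' then opp
    else me
  (opp, me)

-- _round_levels(seg, bet): final (player0, player1) levels of one round.
def roundLevels (seg : List Char) (bet : Int) : Int × Int :=
  let q := seg.foldl (lstep bet) (0, 0)
  if seg.length % 2 = 0 then q else (q.2, q.1)

-- history.split("/") ported as List.splitOn '/' on the character list: exact for a one-character
-- separator (keeps empty pieces; splitting the empty string yields one empty piece). split never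
-- returns an empty list, so the `first, *rest` destructuring never raises; [] is unreachable.
def contributions_py_alt (history : String) : List Int :=
  match history.toList.splitOn '/' with
  | [] => [1, 1]
  | first :: rest =>
    let p := roundLevels first 2
    let c := rest.foldl (fun acc seg =>
      let t := roundLevels seg 4
      (acc.1 + t.1, acc.2 + t.2)) (1 + p.1, 1 + p.2)
    [c.1, c.2]

-- ===== PRECONDITION & SPEC =====
def Spec_contributions_py (history : String) (out : List Int) : Prop := out = contributions_py_alt history
instance (history : String) (out : List Int) : Decidable (Spec_contributions_py history out) := by unfold Spec_contributions_py; infer_instance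

-- ===== CLAIM (what is proved, stated in full; the proofs are below) =====
def Claim_equal_contributions_py : Prop := ∀ (history : String), Dom_contributions_py history → Spec_contributions_py history (contributions_py history)

-- ===== LEMMAS AND PROOFS =====

-- One non-'/' character: A's state update in baseline+levels form; the swapped pair after the
-- step is exactly `lstep` of the swapped pair before it (for either actor).
theorem aStep_lstep0 (ch : Char) (hch : ch ≠ '/') (C0 C1 rd r0 r1 : Int) :
    aStep (C0 + r0, C1 + r1, rd, 0, r0, r1) ch =
      (let q := lstep (betSize rd) (r0, r1) ch
       (C0 + q.2, C1 + q.1, rd, 1, q.2, q.1)) := by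
  simp only [aStep, lstep]
  split_ifs <;> first
  | (exfalso; simp_all; done)
  | (simp only [Prod.mk.injEq]; and_intros <;> first | rfl | decide | ring)

theorem aStep_lstep1 (ch : Char) (hch : ch ≠ '/') (C0 C1 rd r0 r1 : Int) :
    aStep (C0 + r0, C1 + r1, rd, 1, r0, r1) ch =
      (let q := lstep (betSize rd) (r1, r0) ch
       (C0 + q.1, C1 + q.2, rd, 0, q.1, q.2)) := by
  simp only [aStep, lstep]
  split_ifs <;> first
  | (exfalso; simp_all; done)
  | (simp only [Prod.mk.injEq]; and_intros <;> first | rfl | decide | ring)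

theorem splitOn_cons (ch : Char) (t : List Char) :
    (ch :: t).splitOn '/' =
      if ch = '/' then [] :: t.splitOn '/' else (t.splitOn '/').modifyHead (List.cons ch) := by
  simp [List.splitOn, List.splitOnP_cons, beq_iff_eq]

theorem splitOn_ne_nil (l : List Char) : l.splitOn '/' ≠ [] := by
  induction l with
  | nil => simp [List.splitOn, List.splitOnP_nil]
  | cons ch t ih =>
    rw [splitOn_cons]
    split
    · simp
    · cases h : t.splitOn '/' with
      | nil => exact absurd h ih
      | cons f r => simp

-- Invariant: with actor a ∈ {0,1}, A's contributions are a segment-start baseline plus the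
-- current round levels, and B's swapped pair holds (r_a, r_{1-a}); the parity condition tells
-- which order the final pair must be read in.
theorem key (l : List Char) (C0 C1 rd a r0 r1 : Int) (ha : a = 0 ∨ a = 1) :
    (let s := l.foldl aStep (C0 + r0, C1 + r1, rd, a, r0, r1); (s.1, s.2.1)) =
      match l.splitOn '/' with
      | [] => (C0 + r0, C1 + r1)
      | first :: rest =>
        let q := first.foldl (lstep (betSize rd)) (if a = 0 then (r0, r1) else (r1, r0))
        let p := if (a = 0 ↔ first.length % 2 = 0) then q else (q.2, q.1)
        rest.foldl (fun acc seg =>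
          let t := roundLevels seg 4
          (acc.1 + t.1, acc.2 + t.2)) (C0 + p.1, C1 + p.2) := by
  induction l generalizing C0 C1 rd a r0 r1 with
  | nil =>
    rcases ha with h | h <;> subst h <;>
      simp [List.splitOn, List.splitOnP_nil]
  | cons ch t ih =>
    obtain ⟨f, r, hfr⟩ : ∃ f r, t.splitOn '/' = f :: r := by
      cases h : t.splitOn '/' with
      | nil => exact absurd h (splitOn_ne_nil t)
      | cons f r => exact ⟨f, r, rfl⟩
    by_cases hch : ch = '/'
    · subst hch
      rw [splitOn_cons]
      simp only [List.foldl_cons]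
      have hstep : aStep (C0 + r0, C1 + r1, rd, a, r0, r1) '/' =
          ((C0 + r0) + 0, (C1 + r1) + 0, 2, 0, 0, 0) := by simp [aStep]
      rw [hstep]
      have hih := ih (C0 + r0) (C1 + r1) 2 0 0 0 (Or.inl rfl)
      rw [hfr] at hih
      rw [hih]
      rcases ha with h | h <;> subst h <;>
        simp [hfr, roundLevels, betSize, List.foldl_cons]
    · rw [splitOn_cons]
      simp only [if_neg hch, hfr, List.modifyHead, List.foldl_cons]
      rcases ha with h | h <;> subst h
      · rw [aStep_lstep0 ch hch]
        have hih := ih C0 C1 rd 1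
          (lstep (betSize rd) (r0, r1) ch).2 (lstep (betSize rd) (r0, r1) ch).1 (Or.inr rfl)
        rw [hfr] at hih
        by_cases hp : f.length % 2 = 0
        · have h1 : ¬((1 : Int) = 0 ↔ f.length % 2 = 0) := by simp [hp]
          have h2 : ¬((0 : Int) = 0 ↔ (ch :: f).length % 2 = 0) := by
            simp only [List.length_cons]; simp; omega
          simp only [if_neg h1, if_neg (by norm_num : ¬(1 : Int) = 0)] at hih
          rw [if_neg h2]
          simpa using hih
        · have h1 : ((1 : Int) = 0 ↔ f.length % 2 = 0) := by simp [hp]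
          have h2 : ((0 : Int) = 0 ↔ (ch :: f).length % 2 = 0) := by
            simp only [List.length_cons]; simp; omega
          simp only [if_pos h1, if_neg (by norm_num : ¬(1 : Int) = 0)] at hih
          rw [if_pos h2]
          simpa using hih
      · rw [aStep_lstep1 ch hch]
        have hih := ih C0 C1 rd 0
          (lstep (betSize rd) (r1, r0) ch).1 (lstep (betSize rd) (r1, r0) ch).2 (Or.inl rfl)
        rw [hfr] at hih
        by_cases hp : f.length % 2 = 0
        · have h2 : ((1 : Int) = 0 ↔ (ch :: f).length % 2 = 0) := by
            simp only [List.length_cons]; omega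
          simp only [true_iff] at hih
          rw [if_pos hp] at hih
          rw [if_pos h2]
          simpa using hih
        · have h2 : ¬((1 : Int) = 0 ↔ (ch :: f).length % 2 = 0) := by
            simp only [List.length_cons]; omega
          simp only [true_iff] at hih
          rw [if_neg hp] at hih
          rw [if_neg h2]
          simpa using hih

-- ===== VERDICT (by name: the statement is the Claim_ definition above) =====
theorem contributions_py_spec : Claim_equal_contributions_py := by
  intro history _
  unfold Spec_contributions_py contributions_py contributions_py_alt
  have h := key history.toList 1 1 1 0 0 0 (Or.inl rfl)
  cases hfr : history.toList.splitOn '/' with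
  | nil => exact absurd hfr (splitOn_ne_nil _)
  | cons f r =>
    rw [hfr] at h
    simp only [add_zero] at h
    norm_num [roundLevels, betSize] at h ⊢
    exact ⟨congrArg Prod.fst h, congrArg Prod.snd h⟩
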